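-- pv_equiv track=rewrite | github.com/johnPractice/Algorithm-Design-Analysis | HomeWork/1/q5.py | check_hight_low
-- ===== SOURCE A (Python) =====
-- def check_hight_low(arr):
--     result=[0]*(len(arr)+1)
--     sign=True
--     for i in range(0,len(arr)):
--         count=0
--         if arr[i]<0:
--             sign=False
--         elif arr[i]>0:
--             sign=True
--         else:
--             continue
--         for j in range(i+1,len(arr)):
--             if sign==True and arr[j]<0:
--                 count=count=count+1
--             elif sign==False and arr[j]>0:
--                 count=count+1
--         result[i]=max(1,count)
--
--     return max(result)+1
-- ===== SOURCE B (Python) =====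
-- def check_hight_low(arr):
--     best = pos = neg = 0
--     for x in reversed(arr):
--         if x < 0:
--             best = max(best, 1, pos)
--             neg += 1
--         elif x > 0:
--             best = max(best, 1, neg)
--             pos += 1
--     return best + 1
-- ===== Notes on version B (the rewrite author's own statement) =====
-- stated objective: faster
-- what changed: Replaced the quadratic per-index rescan of the suffix by a single reverse pass that maintains running suffix counts of positives and negatives and a running maximum, O(n) instead of O(n^2).
import Mathlib
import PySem

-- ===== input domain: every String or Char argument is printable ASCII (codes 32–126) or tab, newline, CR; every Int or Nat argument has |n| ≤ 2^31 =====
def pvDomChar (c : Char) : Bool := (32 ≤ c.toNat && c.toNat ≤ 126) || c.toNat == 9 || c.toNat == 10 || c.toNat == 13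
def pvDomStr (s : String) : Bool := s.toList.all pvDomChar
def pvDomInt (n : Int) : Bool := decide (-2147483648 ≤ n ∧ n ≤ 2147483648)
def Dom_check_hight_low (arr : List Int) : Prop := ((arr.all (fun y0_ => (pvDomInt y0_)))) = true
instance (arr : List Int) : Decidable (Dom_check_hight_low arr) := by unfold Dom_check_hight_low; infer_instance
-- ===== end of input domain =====

-- B replaces A's quadratic per-index rescan of the suffix by one reverse pass with
-- running suffix counts of positives/negatives (objective: faster, asymptotic).


-- ===== PORT A =====
-- inner loop: 'for j in range(i+1, len(arr)): if sign==True and arr[j]<0: count+=1 elif sign==False and arr[j]>0: count+=1'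
def pvInnerCount (arr : List Int) (i : Int) (sign : Bool) : Int :=
  (PySem.List.pyRange (i + 1) (PySem.List.len arr) 1).foldl
    (fun count j =>
      if sign = true ∧ PySem.List.pyGetD arr j 0 < 0 then count + 1
      else if sign = false ∧ 0 < PySem.List.pyGetD arr j 0 then count + 1
      else count) 0

-- one iteration of the outer loop: branch on arr[i] setting sign ('continue' on 0),
-- run the inner loop with that sign, then result[i] = max(1, count)
def pvStepA (arr : List Int) (st : List Int × Bool) (i : Int) : List Int × Bool :=
  if PySem.List.pyGetD arr i 0 < 0 then
    (PySem.List.pySetD st.1 i (max 1 (pvInnerCount arr i false)), false)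
  else if 0 < PySem.List.pyGetD arr i 0 then
    (PySem.List.pySetD st.1 i (max 1 (pvInnerCount arr i true)), true)
  else st

def check_hight_low (arr : List Int) : Int :=
  let result : List Int := List.replicate (arr.length + 1) 0  -- [0]*(len(arr)+1)
  let st := (PySem.List.pyRange 0 (PySem.List.len arr) 1).foldl (pvStepA arr) (result, true)
  match PySem.List.max? st.1 (fun y => y) with  -- max(result); result is nonempty so 'none' is unreachable
  | some m => m + 1
  | none => 0

-- ===== PORT B =====
def check_hight_low_alt (arr : List Int) : Int :=
  let st := arr.reverse.foldl  -- for x in reversed(arr), state (best, pos, neg)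
    (fun (st : Int × Int × Int) x =>
      if x < 0 then (max (max st.1 1) st.2.1, st.2.1, st.2.2 + 1)
      else if 0 < x then (max (max st.1 1) st.2.2, st.2.1 + 1, st.2.2)
      else st) (0, 0, 0)
  st.1 + 1

-- ===== PRECONDITION & SPEC =====
def Spec_check_hight_low (arr : List Int) (out : Int) : Prop := out = check_hight_low_alt arr
instance (arr : List Int) (out : Int) : Decidable (Spec_check_hight_low arr out) := by unfold Spec_check_hight_low; infer_instance

-- ===== CLAIM (what is proved, stated in full; the proofs are below) =====
def Claim_equal_check_hight_low : Prop := ∀ (arr : List Int), Dom_check_hight_low arr → Spec_check_hight_low arr (check_hight_low arr)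

-- ===== LEMMAS AND PROOFS =====

def posCount (xs : List Int) : Int := (xs.countP (fun y => decide (0 < y)) : Int)
def negCount (xs : List Int) : Int := (xs.countP (fun y => decide (y < 0)) : Int)

def gHead (x : Int) (xs : List Int) : Int :=
  if x < 0 then max 1 (posCount xs) else if 0 < x then max 1 (negCount xs) else 0

def gIdx (arr : List Int) (k : Nat) : Int := gHead (arr.getD k 0) (arr.drop (k + 1))

def bestRec : List Int → Int
  | [] => 0
  | x :: xs => max (bestRec xs) (gHead x xs)

theorem gHead_nonneg (x : Int) (xs : List Int) : 0 ≤ gHead x xs := by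
  unfold gHead; split_ifs <;> omega

theorem bestRec_nonneg (xs : List Int) : 0 ≤ bestRec xs := by
  induction xs with
  | nil => simp [bestRec]
  | cons x xs ih => unfold bestRec; omega

theorem posCount_cons (x : Int) (xs : List Int) :
    posCount (x :: xs) = if 0 < x then posCount xs + 1 else posCount xs := by
  simp [posCount, List.countP_cons]; split_ifs <;> simp

theorem negCount_cons (x : Int) (xs : List Int) :
    negCount (x :: xs) = if x < 0 then negCount xs + 1 else negCount xs := by
  simp [negCount, List.countP_cons]; split_ifs <;> simp

-- B's fold computes (bestRec, posCount, negCount)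
theorem altFold_eq (arr : List Int) :
    arr.reverse.foldl
      (fun (st : Int × Int × Int) x =>
        if x < 0 then (max (max st.1 1) st.2.1, st.2.1, st.2.2 + 1)
        else if 0 < x then (max (max st.1 1) st.2.2, st.2.1 + 1, st.2.2)
        else st) (0, 0, 0)
    = (bestRec arr, posCount arr, negCount arr) := by
  induction arr with
  | nil => simp [bestRec, posCount, negCount]
  | cons x xs ih =>
    rw [List.reverse_cons, List.foldl_append, ih]
    simp only [List.foldl]
    have hcons : bestRec (x :: xs) = max (bestRec xs) (gHead x xs) := rfl
    have hb := bestRec_nonneg xs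
    by_cases h1 : x < 0
    · have hg : gHead x xs = max 1 (posCount xs) := by unfold gHead; rw [if_pos h1]
      rw [if_pos h1, hcons, hg, posCount_cons, negCount_cons, if_pos h1,
        if_neg (by omega : ¬ 0 < x), Prod.mk.injEq, Prod.mk.injEq]
      refine ⟨by omega, rfl, rfl⟩
    · by_cases h2 : 0 < x
      · have hg : gHead x xs = max 1 (negCount xs) := by
          unfold gHead; rw [if_neg h1, if_pos h2]
        rw [if_neg h1, if_pos h2, hcons, hg, posCount_cons, negCount_cons, if_pos h2,
          if_neg h1, Prod.mk.injEq, Prod.mk.injEq]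
        refine ⟨by omega, rfl, rfl⟩
      · have hg : gHead x xs = 0 := by unfold gHead; rw [if_neg h1, if_neg h2]
        rw [if_neg h1, if_neg h2, hcons, hg, posCount_cons, negCount_cons,
          if_neg h2, if_neg h1, Prod.mk.injEq, Prod.mk.injEq]
        refine ⟨by omega, rfl, rfl⟩

-- the inner count equals the count of the opposite sign in the suffix
theorem innerCount_eq_pos (arr : List Int) (m : Nat) :
    pvInnerCount arr (m : Int) false = posCount (arr.drop (m + 1)) := by
  unfold pvInnerCount
  rw [show ((m : Int) + 1) = ((m + 1 : Nat) : Int) by push_cast; ring]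
  rw [PySem.List.foldl_pyRange_pyGetD arr 0
    (fun count y => if false = true ∧ y < 0 then count + 1
      else if false = false ∧ 0 < y then count + 1 else count) 0
    (by positivity)]
  simp only [Int.toNat_natCast, Bool.false_eq_true, false_and, if_false, true_and]
  have h := PySem.List.foldl_count_if (fun y => decide ((0:Int) < y)) (arr.drop (m + 1)) 0
  simp only [decide_eq_true_eq] at h
  rw [h]; simp [posCount]

theorem innerCount_eq_neg (arr : List Int) (m : Nat) :
    pvInnerCount arr (m : Int) true = negCount (arr.drop (m + 1)) := by
  unfold pvInnerCount
  rw [show ((m : Int) + 1) = ((m + 1 : Nat) : Int) by push_cast; ring]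
  rw [PySem.List.foldl_pyRange_pyGetD arr 0
    (fun count y => if true = true ∧ y < 0 then count + 1
      else if true = false ∧ 0 < y then count + 1 else count) 0
    (by positivity)]
  simp only [Int.toNat_natCast, true_and, Bool.true_eq_false,
    false_and, if_false]
  have h := PySem.List.foldl_count_if (fun y => decide (y < (0:Int))) (arr.drop (m + 1)) 0
  simp only [decide_eq_true_eq] at h
  rw [h]; simp [negCount]

-- setting slot m of the partially-filled result array advances the invariant
theorem set_inv (arr : List Int) (m : Nat) (hm : m < arr.length) :
    ((List.range m).map (gIdx arr) ++ List.replicate (arr.length + 1 - m) 0).set m (gIdx arr m)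
    = (List.range (m + 1)).map (gIdx arr) ++ List.replicate (arr.length + 1 - (m + 1)) 0 := by
  rw [List.set_append]
  simp only [List.length_map, List.length_range, lt_self_iff_false, if_false, Nat.sub_self]
  rw [show arr.length + 1 - m = Nat.succ (arr.length - m) by omega, List.replicate_succ,
    List.set_cons_zero, List.range_succ, List.map_append]
  simp [show arr.length + 1 - (m + 1) = arr.length - m by omega]

-- invariant of A's outer loop
theorem foldA_inv (arr : List Int) (m : Nat) (hm : m ≤ arr.length) (s : Bool) :
    ((PySem.List.pyRange 0 (m : Int) 1).foldl (pvStepA arr)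
      (List.replicate (arr.length + 1) 0, s)).1
    = (List.range m).map (gIdx arr) ++ List.replicate (arr.length + 1 - m) 0 := by
  induction m generalizing s with
  | zero =>
    rw [PySem.List.pyRange_one_eq_nil (by norm_num)]
    simp
  | succ m ih =>
    rw [show ((m + 1 : Nat) : Int) = (m : Int) + 1 by push_cast; ring,
      PySem.List.pyRange_one_succ_right (by positivity), List.foldl_append]
    simp only [List.foldl]
    rcases h : (PySem.List.pyRange 0 (m : Int) 1).foldl (pvStepA arr)
        (List.replicate (arr.length + 1) 0, s) with ⟨r1, s1⟩
    have hr1 : r1 = (List.range m).map (gIdx arr) ++ List.replicate (arr.length + 1 - m) 0 := by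
      have := ih (by omega) s
      rw [h] at this; exact this
    have hmlt : m < arr.length := by omega
    have hget : PySem.List.pyGetD arr (m : Int) 0 = arr.getD m 0 :=
      PySem.List.pyGetD_natCast arr m 0
    unfold pvStepA
    simp only [hget]
    by_cases h1 : arr.getD m 0 < 0
    · rw [if_pos h1]
      simp only [PySem.List.pySetD_natCast, innerCount_eq_pos]
      have hg : gIdx arr m = max 1 (posCount (arr.drop (m + 1))) := by
        unfold gIdx gHead; rw [if_pos h1]
      rw [hr1, show max 1 (posCount (arr.drop (m + 1))) = gIdx arr m from hg.symm,
        set_inv arr m hmlt]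
    · by_cases h2 : 0 < arr.getD m 0
      · rw [if_neg h1, if_pos h2]
        simp only [PySem.List.pySetD_natCast, innerCount_eq_neg]
        have hg : gIdx arr m = max 1 (negCount (arr.drop (m + 1))) := by
          unfold gIdx gHead; rw [if_neg h1, if_pos h2]
        rw [hr1, show max 1 (negCount (arr.drop (m + 1))) = gIdx arr m from hg.symm,
          set_inv arr m hmlt]
      · rw [if_neg h1, if_neg h2]
        have hg : gIdx arr m = 0 := by unfold gIdx gHead; rw [if_neg h1, if_neg h2]
        rw [hr1, List.range_succ, List.map_append,
          show arr.length + 1 - m = (arr.length - m) + 1 by omega, List.replicate_succ]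
        simp [hg, show arr.length + 1 - (m + 1) = arr.length - m by omega]

theorem foldl_max_comm (l : List Int) (a b : Int) :
    l.foldl max (max a b) = max a (l.foldl max b) := by
  induction l generalizing a b with
  | nil => simp
  | cons x l ih =>
    simp only [List.foldl]
    rw [show max (max a b) x = max a (max b x) by omega, ih]

theorem maxE_eq (L : List Int) (hL : ∀ x ∈ L, 0 ≤ x) :
    PySem.List.max? (L ++ [0]) (fun y => y) = some (L.foldl max 0) := by
  cases L with
  | nil => simp [PySem.List.max?_id_cons]
  | cons a t =>
    rw [List.cons_append, PySem.List.max?_id_cons]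
    congr 1
    rw [List.foldl_append]
    simp only [List.foldl]
    have ha : 0 ≤ a := hL a (by simp)
    have h1 : t.foldl max a = max a (t.foldl max 0) := by
      rw [show (a : Int) = max a 0 by omega, foldl_max_comm]
      congr 1; omega
    have h2 : a ≤ t.foldl max a := (PySem.List.le_foldl_max t a).1
    rw [show max (0:Int) a = a by omega]
    omega

theorem foldl_max_gIdx (arr : List Int) :
    ((List.range arr.length).map (gIdx arr)).foldl max 0 = bestRec arr := by
  induction arr with
  | nil => simp [bestRec]
  | cons x xs ih =>
    have hmap : (List.range (x :: xs).length).map (gIdx (x :: xs))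
        = gHead x xs :: (List.range xs.length).map (gIdx xs) := by
      simp only [List.length_cons, List.range_succ_eq_map, List.map_cons, List.map_map,
        List.cons.injEq]
      refine ⟨rfl, ?_⟩
      apply List.map_congr_left
      intro k _
      simp [gIdx, Function.comp]
    rw [hmap, List.foldl_cons]
    have hg := gHead_nonneg x xs
    rw [show max (0 : Int) (gHead x xs) = max (gHead x xs) 0 by omega, foldl_max_comm, ih]
    have hcons : bestRec (x :: xs) = max (bestRec xs) (gHead x xs) := rfl
    rw [hcons]; omega

-- ===== VERDICT (by name: the statement is the Claim_ definition above) =====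
theorem check_hight_low_spec : Claim_equal_check_hight_low := by
  intro arr _
  unfold Spec_check_hight_low check_hight_low check_hight_low_alt
  rw [altFold_eq]
  simp only [PySem.List.len_eq]
  have hfold := foldA_inv arr arr.length (le_refl _) true
  rw [hfold, show arr.length + 1 - arr.length = 1 by omega]
  have hnn : ∀ x ∈ (List.range arr.length).map (gIdx arr), (0 : Int) ≤ x := by
    intro x hx
    rcases List.mem_map.mp hx with ⟨k, _, hk⟩
    rw [← hk]; exact gHead_nonneg _ _
  rw [show List.replicate 1 (0 : Int) = [0] from rfl, maxE_eq _ hnn, foldl_max_gIdx]
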